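-- pv_equiv track=rewrite | github.com/silence-3013/SINPA-main | run_gco_wavelet_sweep.py | detect_log_dir
-- ===== SOURCE A (Python) =====
-- def detect_log_dir(stdout_text):
--     # main.py prints args.log_dir explicitly, typically like: ./logs/<dataset>/<model>/<folder>
--     lines = stdout_text.splitlines()
--     for line in lines:
--         line_stripped = line.strip()
--         if line_stripped.startswith('./logs/') or line_stripped.startswith('.\\logs\\') or line_stripped.startswith('.\\logs/'):
--             return line_stripped
--     # also try to find a line that looks like a path with 'logs'
--     for line in lines:
--         if 'logs' in line:
--             return line.strip()
--     return None
-- ===== SOURCE B (Python) =====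
-- def detect_log_dir(stdout_text):
--     fallback = None
--     for line in stdout_text.splitlines():
--         stripped = line.strip()
--         if stripped.startswith('./logs/') or stripped.startswith('.\\logs\\') or stripped.startswith('.\\logs/'):
--             return stripped
--         if fallback is None and 'logs' in line:
--             fallback = stripped
--     return fallback
-- ===== Notes on version B (the rewrite author's own statement) =====
-- stated objective: simpler
-- what changed: Replaced A's two separate scans over the lines by a single pass that returns a prefix-matching stripped line immediately and otherwise remembers the first line containing 'logs' as a fallback.
import Mathlib
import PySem

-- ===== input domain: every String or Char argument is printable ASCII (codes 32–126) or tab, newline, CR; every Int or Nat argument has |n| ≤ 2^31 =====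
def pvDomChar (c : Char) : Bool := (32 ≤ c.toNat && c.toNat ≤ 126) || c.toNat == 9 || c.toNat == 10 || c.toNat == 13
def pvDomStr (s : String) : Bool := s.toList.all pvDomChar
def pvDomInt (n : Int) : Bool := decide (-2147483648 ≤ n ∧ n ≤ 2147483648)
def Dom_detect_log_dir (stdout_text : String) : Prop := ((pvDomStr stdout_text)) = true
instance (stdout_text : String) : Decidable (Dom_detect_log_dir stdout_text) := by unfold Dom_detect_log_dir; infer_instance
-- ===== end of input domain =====

-- B replaces A's two scans by one pass with a fallback variable; objective: simpler.

-- ===== PORT A =====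
-- first loop of A: return the first stripped line starting with one of the three prefixes
def pvLoop1 : List String → Option String
  | [] => none
  | line :: rest =>
    let ls := PySem.Str.strip line
    if PySem.Str.startswith ls "./logs/" || PySem.Str.startswith ls ".\\logs\\" || PySem.Str.startswith ls ".\\logs/" then
      some ls
    else pvLoop1 rest

-- second loop of A: return (stripped) the first line containing 'logs'
def pvLoop2 : List String → Option String
  | [] => none
  | line :: rest =>
    if PySem.Str.isIn "logs" line then some (PySem.Str.strip line)
    else pvLoop2 rest

def detect_log_dir (stdout_text : String) : Option String :=
  let lines := PySem.Str.splitlines stdout_text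
  match pvLoop1 lines with
  | some r => some r
  | none => pvLoop2 lines

-- ===== PORT B =====
-- single pass with a fallback accumulator (None until the first 'logs' line)
def pvAltLoop : List String → Option String → Option String
  | [], fallback => fallback
  | line :: rest, fallback =>
    let stripped := PySem.Str.strip line
    if PySem.Str.startswith stripped "./logs/" || PySem.Str.startswith stripped ".\\logs\\" || PySem.Str.startswith stripped ".\\logs/" then
      some stripped
    else
      pvAltLoop rest (if fallback.isNone && PySem.Str.isIn "logs" line then some stripped else fallback)

def detect_log_dir_alt (stdout_text : String) : Option String :=
  pvAltLoop (PySem.Str.splitlines stdout_text) none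

-- ===== PRECONDITION & SPEC =====
def Spec_detect_log_dir (stdout_text : String) (out : Option String) : Prop := out = detect_log_dir_alt stdout_text
instance (stdout_text : String) (out : Option String) : Decidable (Spec_detect_log_dir stdout_text out) := by unfold Spec_detect_log_dir; infer_instance

-- ===== CLAIM (what is proved, stated in full; the proofs are below) =====
def Claim_equal_detect_log_dir : Prop := ∀ (stdout_text : String), Dom_detect_log_dir stdout_text → Spec_detect_log_dir stdout_text (detect_log_dir stdout_text)

-- ===== LEMMAS AND PROOFS =====
theorem pvAltLoop_eq (ls : List String) (fb : Option String) :
    pvAltLoop ls fb =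
      match pvLoop1 ls with
      | some r => some r
      | none => match fb with
                | some f => some f
                | none => pvLoop2 ls := by
  induction ls generalizing fb with
  | nil => cases fb <;> simp [pvAltLoop, pvLoop1, pvLoop2]
  | cons line rest ih =>
    simp only [pvAltLoop, pvLoop1, pvLoop2]
    split
    · rfl
    · rw [ih]
      cases fb with
      | some f => cases h1 : pvLoop1 rest <;> simp [Option.isNone]
      | none =>
        cases h1 : pvLoop1 rest with
        | some r => simp
        | none =>
          simp only [Option.isNone_none, Bool.true_and]
          by_cases h2 : PySem.Chars.isIn ['l','o','g','s'] line.toList = true <;> simp [h2]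

-- ===== VERDICT (by name: the statement is the Claim_ definition above) =====
theorem detect_log_dir_spec : Claim_equal_detect_log_dir := by
  intro s _
  unfold Spec_detect_log_dir detect_log_dir detect_log_dir_alt
  rw [pvAltLoop_eq]
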